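-- pv_equiv track=rewrite | github.com/KaletaMan/BO-Planer-Podrozniczy | abc_algorithm.py | check_no_repeated_edges
-- ===== SOURCE A (Python) =====
-- def _canon_undirected_edge(a, b):
--     return (a, b) if a <= b else (b, a)
--
-- def check_no_repeated_edges(path):
--     """Zwraca True jeśli żadna krawędź (nieskierowana) nie występuje 2 razy."""
--     used = set()
--     for i in range(len(path) - 1):
--         e = _canon_undirected_edge(path[i], path[i + 1])
--         if e in used:
--             return False
--         used.add(e)
--     return True
-- ===== SOURCE B (Python) =====
-- def _canon_undirected_edge(a, b):
--     return (a, b) if a <= b else (b, a)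
--
-- def check_no_repeated_edges(path):
--     """Zwraca True jesli zadna krawedz (nieskierowana) nie wystepuje 2 razy."""
--     edges = sorted(_canon_undirected_edge(a, b) for a, b in zip(path, path[1:]))
--     return all(x != y for x, y in zip(edges, edges[1:]))
-- ===== Notes on version B (the rewrite author's own statement) =====
-- stated objective: alternative
-- what changed: Replaces A's hash-set membership loop with early exit by a sort-then-scan: sort the canonical edge tuples and check that no two adjacent sorted edges are equal.
import Mathlib
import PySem

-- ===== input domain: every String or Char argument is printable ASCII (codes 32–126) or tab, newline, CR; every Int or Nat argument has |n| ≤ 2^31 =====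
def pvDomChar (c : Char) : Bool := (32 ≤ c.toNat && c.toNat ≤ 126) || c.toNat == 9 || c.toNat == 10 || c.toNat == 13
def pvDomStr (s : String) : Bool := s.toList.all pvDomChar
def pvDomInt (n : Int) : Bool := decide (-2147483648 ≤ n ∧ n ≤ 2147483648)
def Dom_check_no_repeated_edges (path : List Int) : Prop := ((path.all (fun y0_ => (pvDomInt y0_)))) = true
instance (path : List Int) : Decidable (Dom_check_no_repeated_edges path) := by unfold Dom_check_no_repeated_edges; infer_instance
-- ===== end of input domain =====

-- B replaces A's hash-set loop with early exit by sort-then-scan: sort the canonical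
-- edge tuples and check that no two adjacent sorted edges are equal (objective: alternative).

-- ===== PORT A =====
-- _canon_undirected_edge
def canonUndirectedEdge (a b : Int) : Int × Int := if a ≤ b then (a, b) else (b, a)

-- A's for-loop over consecutive elements, with 'used' as loop state and early return False
def checkLoopA : List Int → PySem.Set (Int × Int) → Bool
  | a :: b :: rest, used =>
      let e := canonUndirectedEdge a b
      if PySem.Set.contains used e then false
      else checkLoopA (b :: rest) (PySem.Set.add used e)
  | _, _ => true

def check_no_repeated_edges (path : List Int) : Bool :=
  checkLoopA path PySem.Set.empty

-- ===== PORT B =====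
-- Python's tuple comparison on pairs of ints (lexicographic ≤), used by sorted()
def lexLe (p q : Int × Int) : Bool := decide (p.1 < q.1 ∨ (p.1 = q.1 ∧ p.2 ≤ q.2))

def check_no_repeated_edges_alt (path : List Int) : Bool :=
  let edges := ((path.zip path.tail).map (fun p => canonUndirectedEdge p.1 p.2)).mergeSort lexLe
  (edges.zip edges.tail).all (fun p => decide (p.1 ≠ p.2))

-- ===== PRECONDITION & SPEC =====
def Spec_check_no_repeated_edges (path : List Int) (out : Bool) : Prop := out = check_no_repeated_edges_alt path
instance (path : List Int) (out : Bool) : Decidable (Spec_check_no_repeated_edges path out) := by unfold Spec_check_no_repeated_edges; infer_instance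

-- ===== CLAIM (what is proved, stated in full; the proofs are below) =====
def Claim_equal_check_no_repeated_edges : Prop := ∀ (path : List Int), Dom_check_no_repeated_edges path → Spec_check_no_repeated_edges path (check_no_repeated_edges path)

-- ===== LEMMAS AND PROOFS =====

-- the list of canonical edges of consecutive pairs
def edgesOf (path : List Int) : List (Int × Int) :=
  (path.zip path.tail).map (fun p => canonUndirectedEdge p.1 p.2)

theorem edgesOf_cons_cons (a b : Int) (rest : List Int) :
    edgesOf (a :: b :: rest) = canonUndirectedEdge a b :: edgesOf (b :: rest) := by
  simp [edgesOf]

-- A's loop replayed over an arbitrary starting set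
theorem checkLoopA_char :
    ∀ (path : List Int) (used : PySem.Set (Int × Int)),
      checkLoopA path used
        = decide ((∀ e ∈ edgesOf path, e ∉ used) ∧ (edgesOf path).Nodup) := by
  intro path
  induction path with
  | nil => intro used; simp [checkLoopA, edgesOf]
  | cons a rest ih =>
    cases rest with
    | nil => intro used; simp [checkLoopA, edgesOf]
    | cons b rest' =>
      intro used
      rw [edgesOf_cons_cons]
      by_cases hmem : canonUndirectedEdge a b ∈ used
      · simp [checkLoopA, hmem]
      · rw [show checkLoopA (a :: b :: rest') used
              = checkLoopA (b :: rest') (PySem.Set.add used (canonUndirectedEdge a b)) by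
            simp [checkLoopA, hmem]]
        rw [ih]
        simp only [decide_eq_decide, List.mem_cons, List.nodup_cons, PySem.Set.mem_add]
        constructor
        · rintro ⟨hall, hnd⟩
          refine ⟨?_, ?_, hnd⟩
          · intro e he
            rcases he with rfl | he
            · exact hmem
            · intro hc; exact hall e he (Or.inl hc)
          · intro hc; exact hall _ hc (Or.inr rfl)
        · rintro ⟨hall, hcE, hnd⟩
          refine ⟨?_, hnd⟩
          intro e he hc
          rcases hc with hc | rfl
          · exact hall e (Or.inr he) hc
          · exact hcE he

theorem lexLe_trans (a b c : Int × Int) (h1 : lexLe a b = true) (h2 : lexLe b c = true) :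
    lexLe a c = true := by
  rcases a with ⟨a1, a2⟩; rcases b with ⟨b1, b2⟩; rcases c with ⟨c1, c2⟩
  simp [lexLe] at *; omega

theorem lexLe_total (a b : Int × Int) : lexLe a b = true ∨ lexLe b a = true := by
  rcases a with ⟨a1, a2⟩; rcases b with ⟨b1, b2⟩
  simp [lexLe]; omega

-- strict step plus ≤ step keeps elements distinct
theorem lex_ne (a b x : Int × Int) (hab : lexLe a b = true) (hne : a ≠ b)
    (hbx : lexLe b x = true) : a ≠ x := by
  rcases a with ⟨a1, a2⟩; rcases b with ⟨b1, b2⟩; rcases x with ⟨x1, x2⟩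
  simp [lexLe] at hab hbx
  simp only [ne_eq, Prod.mk.injEq, not_and] at hne ⊢
  intro h1 h2
  subst h1; subst h2
  rcases hab with h | h <;> rcases hbx with h' | h' <;> [omega; omega; omega; exact hne h'.1.symm (by omega)]

-- on a lexLe-sorted list, adjacent distinctness decides Nodup
theorem adj_all_ne_iff_nodup :
    ∀ (l : List (Int × Int)), l.Pairwise (fun p q => lexLe p q = true) →
      (((l.zip l.tail).all (fun p => decide (p.1 ≠ p.2))) = true ↔ l.Nodup) := by
  intro l
  induction l with
  | nil => intro _; simp
  | cons a t ih =>
    cases t with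
    | nil => intro _; simp
    | cons b t' =>
      intro hp
      have hab : lexLe a b = true := (List.pairwise_cons.mp hp).1 b (by simp)
      have hp' : (b :: t').Pairwise (fun p q => lexLe p q = true) := (List.pairwise_cons.mp hp).2
      have hbx : ∀ x ∈ t', lexLe b x = true := fun x hx => (List.pairwise_cons.mp hp').1 x hx
      constructor
      · intro h
        simp only [List.tail_cons, List.zip_cons_cons, List.all_cons, Bool.and_eq_true,
          decide_eq_true_eq] at h
        have hnd := (ih hp').mpr
        have hrest : (b :: t').Nodup := (ih hp').mp h.2
        refine List.nodup_cons.mpr ⟨?_, hrest⟩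
        intro hmem
        rcases List.mem_cons.mp hmem with rfl | hmem'
        · exact h.1 rfl
        · exact lex_ne a b a hab h.1 (hbx a hmem') rfl
      · intro hnd
        rcases List.nodup_cons.mp hnd with ⟨hnm, hrest⟩
        simp only [List.tail_cons, List.zip_cons_cons, List.all_cons, Bool.and_eq_true,
          decide_eq_true_eq]
        exact ⟨fun hc => hnm (hc ▸ List.mem_cons_self ..), (ih hp').mpr hrest⟩

-- ===== VERDICT (by name: the statement is the Claim_ definition above) =====
theorem check_no_repeated_edges_spec : Claim_equal_check_no_repeated_edges := by
  intro path _
  unfold Spec_check_no_repeated_edges check_no_repeated_edges check_no_repeated_edges_alt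
  rw [checkLoopA_char]
  show _ = (((edgesOf path).mergeSort lexLe).zip ((edgesOf path).mergeSort lexLe).tail).all
      (fun p => decide (p.1 ≠ p.2))
  have hperm : List.Perm ((edgesOf path).mergeSort lexLe) (edgesOf path) := List.mergeSort_perm _ _
  have hsorted : ((edgesOf path).mergeSort lexLe).Pairwise (fun p q => lexLe p q = true) := by
    have := List.pairwise_mergeSort (le := lexLe)
      (fun a b c => lexLe_trans a b c)
      (fun a b => by rcases lexLe_total a b with h | h <;> simp [h]) (edgesOf path)
    simpa using this
  have hiff := adj_all_ne_iff_nodup _ hsorted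
  have hnodup_iff : ((edgesOf path).mergeSort lexLe).Nodup ↔ (edgesOf path).Nodup :=
    hperm.nodup_iff
  by_cases hnd : (edgesOf path).Nodup
  · rw [hiff.mpr (hnodup_iff.mpr hnd)]
    simp [hnd, PySem.Set.empty]
  · have : ¬ (((edgesOf path).mergeSort lexLe).zip ((edgesOf path).mergeSort lexLe).tail).all
        (fun p => decide (p.1 ≠ p.2)) = true := fun hc => hnd (hnodup_iff.mp (hiff.mp hc))
    simp only [Bool.not_eq_true] at this
    rw [this]
    simp [hnd, PySem.Set.empty]
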